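-- pv_equiv track=rewrite | github.com/Kuba7331/Matura | szyfrPrzestawieniowy.py | transpositionCipher
-- ===== SOURCE A (Python) =====
-- def transpositionCipher(text):
--     encrypted = []
--     for i in range(1, len(text), 2):
--         encrypted.append(text[i])
--         encrypted.append(text[i-1])
--     if len(text) % 2 == 1:
--         encrypted.append(text[-1])
--     return encrypted
-- ===== SOURCE B (Python) =====
-- def transpositionCipher(text):
--     n = len(text)
--     return [text[i ^ 1] if i ^ 1 < n else text[i] for i in range(n)]
-- ===== Notes on version B (the rewrite author's own statement) =====
-- stated objective: alternative
-- what changed: Replaces the pair-append loop (plus odd-length tail fix-up) by a single comprehension that computes each output position directly via the index permutation i^1, falling back to text[i] for the odd leftover.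
import Mathlib
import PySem

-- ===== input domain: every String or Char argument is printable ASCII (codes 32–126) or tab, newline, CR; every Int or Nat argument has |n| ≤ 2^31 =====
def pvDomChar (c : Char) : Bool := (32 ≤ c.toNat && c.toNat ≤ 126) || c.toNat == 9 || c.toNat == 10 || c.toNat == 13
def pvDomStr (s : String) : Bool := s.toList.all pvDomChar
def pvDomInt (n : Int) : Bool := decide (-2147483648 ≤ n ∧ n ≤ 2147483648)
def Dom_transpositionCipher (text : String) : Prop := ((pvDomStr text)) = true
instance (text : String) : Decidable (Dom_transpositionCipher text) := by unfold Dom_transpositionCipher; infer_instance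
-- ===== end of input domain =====

-- B swaps adjacent characters via the index permutation i^1 (one comprehension) instead of A's
-- pair-append loop with an odd-length tail fix-up; same cost, different decomposition.

-- ===== PORT A =====
-- Loop 'for i in range(1, len(text), 2): append(text[i]); append(text[i-1])'; each text[j] is a
-- 1-char string. pyGetD's default ' ' is unreachable (every index used is in range in Python too).
def transpositionCipher (text : String) : List String :=
  let cs := text.toList
  let encrypted := (PySem.List.pyRange 1 (cs.length : Int) 2).foldl
    (fun acc i =>
      (acc ++ [String.ofList [PySem.List.pyGetD cs i ' ']]) ++ [String.ofList [PySem.List.pyGetD cs (i - 1) ' ']])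
    []
  if cs.length % 2 = 1 then encrypted ++ [String.ofList [PySem.List.pyGetD cs (-1) ' ']]
  else encrypted

-- ===== PORT B =====
-- [text[i ^ 1] if i ^ 1 < n else text[i] for i in range(n)]; every index used is nonnegative and
-- in range, so pyGetD's default ' ' is unreachable.
def transpositionCipher_alt (text : String) : List String :=
  let cs := text.toList
  (List.range cs.length).map (fun i =>
    if i ^^^ 1 < cs.length then String.ofList [PySem.List.pyGetD cs ((i ^^^ 1 : Nat) : Int) ' ']
    else String.ofList [PySem.List.pyGetD cs ((i : Nat) : Int) ' '])

-- ===== PRECONDITION & SPEC =====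
def Spec_transpositionCipher (text : String) (out : List String) : Prop := out = transpositionCipher_alt text
instance (text : String) (out : List String) : Decidable (Spec_transpositionCipher text out) := by unfold Spec_transpositionCipher; infer_instance

-- ===== CLAIM (what is proved, stated in full; the proofs are below) =====
def Claim_equal_transpositionCipher : Prop := ∀ (text : String), Dom_transpositionCipher text → Spec_transpositionCipher text (transpositionCipher text)

-- ===== LEMMAS AND PROOFS =====

-- i ^^^ 1 on the two parities, and its behaviour under +2
theorem pv_xor_one_even (q : Nat) : (2 * q) ^^^ 1 = 2 * q + 1 := by
  have h := Nat.xor_bit false q true 0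
  simpa [Nat.bit, Nat.mul_comm] using h

theorem pv_xor_one_odd (q : Nat) : (2 * q + 1) ^^^ 1 = 2 * q := by
  have h := Nat.xor_bit true q true 0
  simpa [Nat.bit, Nat.mul_comm] using h

theorem pv_xor_one_add_two (i : Nat) : (i + 2) ^^^ 1 = (i ^^^ 1) + 2 := by
  rcases Nat.even_or_odd i with ⟨q, hq⟩ | ⟨q, hq⟩
  · have e1 : i = 2 * q := by omega
    rw [e1, show 2 * q + 2 = 2 * (q + 1) from by ring, pv_xor_one_even, pv_xor_one_even]; omega
  · have e1 : i = 2 * q + 1 := by omega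
    rw [e1, show 2 * q + 1 + 2 = 2 * (q + 1) + 1 from by ring, pv_xor_one_odd, pv_xor_one_odd]; omega

-- closed Nat-indexed form of A's body
def pvAform (cs : List Char) : List String :=
  (List.range (cs.length / 2)).flatMap
    (fun k => [String.ofList [cs.getD (2 * k + 1) ' '], String.ofList [cs.getD (2 * k) ' ']]) ++
  (if cs.length % 2 = 1 then [String.ofList [cs.getD (cs.length - 1) ' ']] else [])

-- closed Nat-indexed form of B's body
def pvBform (cs : List Char) : List String :=
  (List.range cs.length).map (fun i =>
    if i ^^^ 1 < cs.length then String.ofList [cs.getD (i ^^^ 1) ' '] else String.ofList [cs.getD i ' '])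

theorem pv_pyGetD_neg_one (cs : List Char) (d : Char) (h : cs ≠ []) :
    PySem.List.pyGetD cs (-1) d = cs.getD (cs.length - 1) d := by
  have hl : 0 < cs.length := List.length_pos_iff.mpr h
  have h1 : 1 ≤ cs.length := hl
  simp [PySem.List.pyGetD, PySem.List.pyGet?, PySem.List.pyIdx?, hl, h1, List.getD_eq_getElem?_getD]

theorem pv_A_eq_form (text : String) : transpositionCipher text = pvAform text.toList := by
  unfold transpositionCipher pvAform
  set cs := text.toList with hcs
  show ((PySem.List.pyRange 1 (cs.length : Int) 2).foldl
    (fun acc i =>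
      (acc ++ [String.ofList [PySem.List.pyGetD cs i ' ']]) ++ [String.ofList [PySem.List.pyGetD cs (i - 1) ' ']]) []
    |> (fun encrypted => if cs.length % 2 = 1 then encrypted ++ [String.ofList [PySem.List.pyGetD cs (-1) ' ']]
        else encrypted)) = _
  have hfun : (fun (acc : List String) (i : Int) =>
      (acc ++ [String.ofList [PySem.List.pyGetD cs i ' ']]) ++ [String.ofList [PySem.List.pyGetD cs (i - 1) ' ']]) =
      (fun acc i => acc ++ ([String.ofList [PySem.List.pyGetD cs i ' ']] ++ [String.ofList [PySem.List.pyGetD cs (i - 1) ' ']])) := by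
    funext acc i; simp
  rw [hfun, PySem.List.foldl_append_eq_flatMap]
  rw [PySem.List.pyRange_of_pos 1 (cs.length : Int) (by norm_num)]
  rw [List.flatMap_map]
  have hcnt : (if (1 : Int) < (cs.length : Int) then (((cs.length : Int) - 1 + 2 - 1) / 2).toNat else 0)
      = cs.length / 2 := by
    split_ifs with h
    · have e : ((cs.length : Int) - 1 + 2 - 1) = ((cs.length : Nat) : Int) := by ring
      rw [e]
      have e2 : ((cs.length : Nat) : Int) / 2 = ((cs.length / 2 : Nat) : Int) := by omega
      rw [e2, Int.toNat_natCast]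
    · have : cs.length ≤ 1 := by exact_mod_cast by omega
      omega
  rw [hcnt]
  have hg : (fun (k : Nat) => [String.ofList [PySem.List.pyGetD cs (1 + 2 * (k : Int)) ' '],
        String.ofList [PySem.List.pyGetD cs (1 + 2 * (k : Int) - 1) ' ']])
      = (fun k => [String.ofList [cs.getD (2 * k + 1) ' '], String.ofList [cs.getD (2 * k) ' ']]) := by
    funext k
    have e1 : (1 : Int) + 2 * (k : Int) = ((2 * k + 1 : Nat) : Int) := by push_cast; ring
    have e2 : (1 : Int) + 2 * (k : Int) - 1 = ((2 * k : Nat) : Int) := by push_cast; ring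
    rw [e2, e1, PySem.List.pyGetD_natCast, PySem.List.pyGetD_natCast]
  simp only [List.singleton_append]
  rw [hg]
  by_cases hodd : cs.length % 2 = 1
  · have hne : cs ≠ [] := by intro h; rw [h] at hodd; simp at hodd
    simp [hodd, pv_pyGetD_neg_one cs ' ' hne]
  · simp [hodd]

theorem pv_B_eq_form (text : String) : transpositionCipher_alt text = pvBform text.toList := by
  unfold transpositionCipher_alt pvBform
  simp only [PySem.List.pyGetD_natCast]

theorem pv_form_eq_aux : ∀ (n : Nat) (cs : List Char), cs.length ≤ n → pvAform cs = pvBform cs := by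
  intro n
  induction n using Nat.strong_induction_on with
  | _ n ih =>
    intro cs hlen
    match cs with
    | [] => rfl
    | [a] => simp [pvAform, pvBform]
    | a :: b :: r =>
      have hlt : r.length < n := by simp at hlen; omega
      have IH := ih r.length hlt r le_rfl
      have hlen2 : (a :: b :: r).length = r.length + 2 := by simp
      have hA : pvAform (a :: b :: r) = String.ofList [b] :: String.ofList [a] :: pvAform r := by
        unfold pvAform
        rw [hlen2, show (r.length + 2) / 2 = r.length / 2 + 1 from by omega, List.range_succ_eq_map]
        rw [List.flatMap_cons, List.flatMap_map]
        have hg : (fun (k : Nat) => [String.ofList [(a :: b :: r).getD (2 * (Nat.succ k) + 1) ' '],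
              String.ofList [(a :: b :: r).getD (2 * (Nat.succ k)) ' ']])
            = (fun k => [String.ofList [r.getD (2 * k + 1) ' '], String.ofList [r.getD (2 * k) ' ']]) := by
          funext k
          rw [show 2 * (Nat.succ k) + 1 = (2 * k + 1) + 1 + 1 from by omega,
              show 2 * (Nat.succ k) = (2 * k) + 1 + 1 from by omega,
              List.getD_cons_succ, List.getD_cons_succ, List.getD_cons_succ, List.getD_cons_succ]
        rw [hg, show (r.length + 2) % 2 = r.length % 2 from by omega]
        have htail : (if r.length % 2 = 1 then
              [String.ofList [(a :: b :: r).getD (r.length + 2 - 1) ' ']] else [])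
            = (if r.length % 2 = 1 then [String.ofList [r.getD (r.length - 1) ' ']] else []) := by
          split_ifs with h
          · rw [show r.length + 2 - 1 = (r.length - 1) + 1 + 1 from by omega,
                List.getD_cons_succ, List.getD_cons_succ]
          · rfl
        rw [htail]
        simp
      have hB : pvBform (a :: b :: r) = String.ofList [b] :: String.ofList [a] :: pvBform r := by
        unfold pvBform
        rw [hlen2, List.range_succ_eq_map, List.range_succ_eq_map]
        rw [List.map_cons, List.map_map, List.map_cons, List.map_map]
        have hg : (((fun i => if i ^^^ 1 < r.length + 2 then
              String.ofList [(a :: b :: r).getD (i ^^^ 1) ' ']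
            else String.ofList [(a :: b :: r).getD i ' ']) ∘ Nat.succ) ∘ Nat.succ)
            = (fun k => if k ^^^ 1 < r.length then String.ofList [r.getD (k ^^^ 1) ' ']
               else String.ofList [r.getD k ' ']) := by
          funext k
          show (if (k + 2) ^^^ 1 < r.length + 2 then
              String.ofList [(a :: b :: r).getD ((k + 2) ^^^ 1) ' ']
            else String.ofList [(a :: b :: r).getD (k + 2) ' ']) = _
          rw [pv_xor_one_add_two k]
          have hiff : (k ^^^ 1) + 2 < r.length + 2 ↔ k ^^^ 1 < r.length := by omega
          split_ifs with h h' h'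
          · rw [List.getD_cons_succ, List.getD_cons_succ]
          · exact absurd (hiff.mp h) h'
          · exact absurd (hiff.mpr h') h
          · rw [show k + 2 = k + 1 + 1 from rfl, List.getD_cons_succ, List.getD_cons_succ]
        rw [hg]
        have h0 : (0 : Nat) ^^^ 1 = 1 := by decide
        have h1 : Nat.succ 0 ^^^ 1 = 0 := by decide
        simp [h0, h1, show (1 : Nat) < r.length + 2 from by omega,
          show (0 : Nat) < r.length + 2 from by omega]
      rw [hA, hB, IH]

theorem pv_form_eq (cs : List Char) : pvAform cs = pvBform cs :=
  pv_form_eq_aux cs.length cs le_rfl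

-- ===== VERDICT (by name: the statement is the Claim_ definition above) =====
theorem transpositionCipher_spec : Claim_equal_transpositionCipher := by
  intro text _
  unfold Spec_transpositionCipher
  rw [pv_A_eq_form, pv_B_eq_form, pv_form_eq]
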